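-- pv_equiv track=rewrite | github.com/HungryFly/flyARC | Noah_forAnalyses/Noah15.8.py | sleepDepth
-- ===== SOURCE A (Python) =====
-- def sleepDepth(sleep, readsPerSec):
-- 	# This algorithm cycles through the sleep binary and keeps a count of
-- 	# seconds sleeping. When the count is within the light , med , or deep sleep
-- 	# range it will append a 1 to that given list (light,med,deep), Note: sleep depths not currently in use
--
-- 	light = []
-- 	med = []
-- 	deep = []
--
-- 	for fly in range(len(sleep)):
-- 		sL = []
-- 		sM = []
-- 		sD = []
-- 		count = 0
-- 		for read in range(len(sleep[fly])):
-- 			# Sleep Second Counter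
-- 			if sleep[fly][read] == 1:
-- 				count = count + 1
-- 			else:
-- 				count = 0
--
-- 			# Test for which sleep category count falls under
-- 			if count > 0 and count < (600 * readsPerSec):
-- 				sL.append(1)
-- 				sM.append(0)
-- 				sD.append(0)
-- 			elif count >= (600 * readsPerSec) and count < (1500 * readsPerSec):
-- 				sL.append(0)
-- 				sM.append(1)
-- 				sD.append(0)
-- 			elif count >= (1500 * readsPerSec):
-- 				sL.append(0)
-- 				sM.append(0)
-- 				sD.append(1)
-- 			else:
-- 				sL.append(0)
-- 				sM.append(0)
-- 				sD.append(0)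
-- 		light.append(sL)
-- 		med.append(sM)
-- 		deep.append(sD)
--
-- 	return light, med, deep
-- ===== SOURCE B (Python) =====
-- def sleepDepth(sleep, readsPerSec):
--     # Run-grouping re-implementation: find maximal runs of 1s, classify each
--     # second by its offset inside its run; awake seconds are (0,0,0)-classified.
--     lo = 600 * readsPerSec
--     hi = 1500 * readsPerSec
--
--     def classify(c):
--         if 0 < c < lo:
--             return (1, 0, 0)
--         if lo <= c < hi:
--             return (0, 1, 0)
--         if c >= hi:
--             return (0, 0, 1)
--         return (0, 0, 0)
--
--     light, med, deep = [], [], []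
--     for series in sleep:
--         triples = []
--         i, n = 0, len(series)
--         while i < n:
--             if series[i] == 1:
--                 j = i
--                 while j < n and series[j] == 1:
--                     j += 1
--                 triples.extend(classify(off + 1) for off in range(j - i))
--                 i = j
--             else:
--                 triples.append(classify(0))
--                 i += 1
--         light.append([t[0] for t in triples])
--         med.append([t[1] for t in triples])
--         deep.append([t[2] for t in triples])
--     return light, med, deep
-- ===== Notes on version B (the rewrite author's own statement) =====
-- stated objective: alternative
-- what changed: Replaces the stateful running-counter-with-reset loop by a run-grouping traversal: each maximal run of 1s is found once and every second inside it is classified by its offset, building rows of one-hot triples that are then split into the three lists.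
import Mathlib
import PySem

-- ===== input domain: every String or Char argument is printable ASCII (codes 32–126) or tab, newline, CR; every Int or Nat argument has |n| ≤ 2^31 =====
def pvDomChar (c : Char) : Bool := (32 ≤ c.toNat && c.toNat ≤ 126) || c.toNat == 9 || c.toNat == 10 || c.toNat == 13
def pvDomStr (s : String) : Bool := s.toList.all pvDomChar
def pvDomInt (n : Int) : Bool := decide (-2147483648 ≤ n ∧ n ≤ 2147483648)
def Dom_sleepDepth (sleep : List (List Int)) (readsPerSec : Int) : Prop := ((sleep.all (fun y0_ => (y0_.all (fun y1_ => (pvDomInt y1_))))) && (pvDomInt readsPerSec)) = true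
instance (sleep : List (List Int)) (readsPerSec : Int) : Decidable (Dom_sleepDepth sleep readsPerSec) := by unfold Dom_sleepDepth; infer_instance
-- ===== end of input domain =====

-- B replaces A's running sleep-counter with a run-grouping traversal (classify each
-- second by its offset inside its maximal run of 1s); same cost, different decomposition.

-- ===== PORT A =====
-- one iteration of A's inner loop body (count update, then the branch chain of appends)
def pvAStep (rps : Int) (st : List Int × List Int × List Int × Int) (x : Int) :
    List Int × List Int × List Int × Int :=
  let count : Int := if x = 1 then st.2.2.2 + 1 else 0
  if 0 < count ∧ count < 600 * rps then (st.1 ++ [1], st.2.1 ++ [0], st.2.2.1 ++ [0], count)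
  else if 600 * rps ≤ count ∧ count < 1500 * rps then (st.1 ++ [0], st.2.1 ++ [1], st.2.2.1 ++ [0], count)
  else if 1500 * rps ≤ count then (st.1 ++ [0], st.2.1 ++ [0], st.2.2.1 ++ [1], count)
  else (st.1 ++ [0], st.2.1 ++ [0], st.2.2.1 ++ [0], count)

-- A's inner loop: for read in range(len(sleep[fly]))
def pvAInner (rps : Int) (series : List Int) : List Int × List Int × List Int × Int :=
  (PySem.List.pyRange 0 (series.length : Int) 1).foldl
    (fun st read => pvAStep rps st (PySem.List.pyGetD series read 0)) ([], [], [], 0)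

-- A's outer loop body: run the inner loop and append the three per-fly lists
def pvAFly (rps : Int) (acc : List (List Int) × List (List Int) × List (List Int))
    (series : List Int) : List (List Int) × List (List Int) × List (List Int) :=
  let r := pvAInner rps series
  (acc.1 ++ [r.1], acc.2.1 ++ [r.2.1], acc.2.2 ++ [r.2.2.1])

def sleepDepth (sleep : List (List Int)) (readsPerSec : Int) :
    List (List Int) × List (List Int) × List (List Int) :=
  (PySem.List.pyRange 0 (sleep.length : Int) 1).foldl
    (fun acc fly => pvAFly readsPerSec acc (PySem.List.pyGetD sleep fly []))
    ([], [], [])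

-- ===== PORT B =====
-- B's classify(c): same one-hot thresholds, taken as a function of the count
def pvClassify (lo hi c : Int) : Int × Int × Int :=
  if 0 < c ∧ c < lo then (1, 0, 0)
  else if lo ≤ c ∧ c < hi then (0, 1, 0)
  else if hi ≤ c then (0, 0, 1)
  else (0, 0, 0)

-- B's run-grouping scan: one row of one-hot triples per series
def pvRunsB (lo hi : Int) : List Int → List (Int × Int × Int)
  | [] => []
  | x :: xs =>
    if x = 1 then
      ((List.range ((xs.takeWhile (fun y => y == 1)).length + 1)).map
          (fun (off : Nat) => pvClassify lo hi ((off : Int) + 1)))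
        ++ pvRunsB lo hi (xs.dropWhile (fun y => y == 1))
    else pvClassify lo hi 0 :: pvRunsB lo hi xs
termination_by xs => xs.length
decreasing_by
  · exact Nat.lt_succ_of_le (List.length_dropWhile_le _ _)
  · exact Nat.lt_succ_self _

def sleepDepth_alt (sleep : List (List Int)) (readsPerSec : Int) :
    List (List Int) × List (List Int) × List (List Int) :=
  let lo := 600 * readsPerSec
  let hi := 1500 * readsPerSec
  let rows := sleep.map (fun series => pvRunsB lo hi series)
  (rows.map (fun r => r.map (fun t => t.1)),
   rows.map (fun r => r.map (fun t => t.2.1)),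
   rows.map (fun r => r.map (fun t => t.2.2)))

-- ===== PRECONDITION & SPEC =====
def Spec_sleepDepth (sleep : List (List Int)) (readsPerSec : Int) (out : List (List Int) × List (List Int) × List (List Int)) : Prop := out = sleepDepth_alt sleep readsPerSec
instance (sleep : List (List Int)) (readsPerSec : Int) (out : List (List Int) × List (List Int) × List (List Int)) : Decidable (Spec_sleepDepth sleep readsPerSec out) := by unfold Spec_sleepDepth; infer_instance

-- ===== CLAIM (what is proved, stated in full; the proofs are below) =====
def Claim_equal_sleepDepth : Prop := ∀ (sleep : List (List Int)) (readsPerSec : Int), Dom_sleepDepth sleep readsPerSec → Spec_sleepDepth sleep readsPerSec (sleepDepth sleep readsPerSec)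

-- ===== LEMMAS AND PROOFS =====

-- element-wise view of A's inner loop (the running counter, front-building)
def pvG (lo hi : Int) (c : Int) : List Int → List (Int × Int × Int)
  | [] => []
  | x :: xs =>
    let c' := if x = 1 then c + 1 else 0
    pvClassify lo hi c' :: pvG lo hi c' xs

-- the final value of A's counter
def pvCnt (c : Int) : List Int → Int
  | [] => c
  | x :: xs => pvCnt (if x = 1 then c + 1 else 0) xs

lemma pvAStep_eq (rps : Int) (st : List Int × List Int × List Int × Int) (x : Int) :
    pvAStep rps st x =
      (st.1 ++ [(pvClassify (600 * rps) (1500 * rps) (if x = 1 then st.2.2.2 + 1 else 0)).1],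
       st.2.1 ++ [(pvClassify (600 * rps) (1500 * rps) (if x = 1 then st.2.2.2 + 1 else 0)).2.1],
       st.2.2.1 ++ [(pvClassify (600 * rps) (1500 * rps) (if x = 1 then st.2.2.2 + 1 else 0)).2.2],
       if x = 1 then st.2.2.2 + 1 else 0) := by
  simp only [pvAStep, pvClassify]
  split_ifs <;> rfl

lemma foldl_inner (rps : Int) (xs : List Int) :
    ∀ (sL sM sD : List Int) (c : Int),
      xs.foldl (pvAStep rps) (sL, sM, sD, c) =
        (sL ++ (pvG (600 * rps) (1500 * rps) c xs).map (fun t => t.1),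
         sM ++ (pvG (600 * rps) (1500 * rps) c xs).map (fun t => t.2.1),
         sD ++ (pvG (600 * rps) (1500 * rps) c xs).map (fun t => t.2.2),
         pvCnt c xs) := by
  induction xs with
  | nil => intro sL sM sD c; simp [pvG, pvCnt]
  | cons x xs ih =>
      intro sL sM sD c
      rw [List.foldl_cons, pvAStep_eq, ih]
      simp [pvG, pvCnt]

-- shifting the starting count only shifts the offsets inside the leading run of 1s
lemma pvG_shift (lo hi : Int) (xs : List Int) : ∀ (c : Int),
    pvG lo hi c xs =
      ((List.range ((xs.takeWhile (fun y => y == 1)).length)).map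
          (fun (off : Nat) => pvClassify lo hi (c + (off : Int) + 1)))
        ++ pvG lo hi 0 (xs.dropWhile (fun y => y == 1)) := by
  induction xs with
  | nil => intro c; simp [pvG]
  | cons x xs ih =>
      intro c
      by_cases hx : x = 1
      · have ht : (x :: xs).takeWhile (fun y => y == 1) = x :: xs.takeWhile (fun y => y == 1) := by
          simp [hx]
        have hd : (x :: xs).dropWhile (fun y => y == 1) = xs.dropWhile (fun y => y == 1) := by
          simp [hx]
        rw [ht, hd]
        simp only [pvG, hx, if_true, List.length_cons, List.range_succ_eq_map,
          List.map_cons, List.map_map]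
        rw [ih (c + 1)]
        simp only [List.cons_append, Nat.cast_zero, add_zero]
        congr 1
        congr 1
        apply List.map_congr_left
        intro a _
        congr 1
        push_cast
        ring
      · have ht : (x :: xs).takeWhile (fun y => y == 1) = [] := by
          simp [hx]
        have hd : (x :: xs).dropWhile (fun y => y == 1) = x :: xs := by
          simp [hx]
        rw [ht, hd]
        simp [pvG, hx]

-- A's counter view coincides with B's run-grouping scan
theorem pvG_zero_eq_runsB (lo hi : Int) : ∀ (xs : List Int), pvG lo hi 0 xs = pvRunsB lo hi xs
  | [] => by simp [pvG, pvRunsB]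
  | x :: xs => by
      by_cases hx : x = 1
      · rw [pvG_shift lo hi (x :: xs) 0, pvRunsB]
        have ht : (x :: xs).takeWhile (fun y => y == 1) = x :: xs.takeWhile (fun y => y == 1) := by
          simp [hx]
        have hd : (x :: xs).dropWhile (fun y => y == 1) = xs.dropWhile (fun y => y == 1) := by
          simp [hx]
        rw [ht, hd, if_pos hx, pvG_zero_eq_runsB lo hi (xs.dropWhile (fun y => y == 1))]
        congr 1
        apply List.map_congr_left
        intro a _
        norm_num
      · have ht : (x :: xs).takeWhile (fun y => y == 1) = [] := by
          simp [hx]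
        have hd : (x :: xs).dropWhile (fun y => y == 1) = x :: xs := by
          simp [hx]
        rw [pvRunsB, if_neg hx, ← pvG_zero_eq_runsB lo hi xs]
        simp [pvG, hx]
termination_by xs => xs.length
decreasing_by
  · exact Nat.lt_succ_of_le (List.length_dropWhile_le _ _)
  · exact Nat.lt_succ_self _

lemma pvAInner_eq (rps : Int) (series : List Int) :
    pvAInner rps series =
      ((pvRunsB (600 * rps) (1500 * rps) series).map (fun t => t.1),
       (pvRunsB (600 * rps) (1500 * rps) series).map (fun t => t.2.1),
       (pvRunsB (600 * rps) (1500 * rps) series).map (fun t => t.2.2),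
       pvCnt 0 series) := by
  unfold pvAInner
  rw [PySem.List.foldl_pyRange_zero_pyGetD' series 0 (pvAStep rps) ([], [], [], 0)]
  rw [foldl_inner, pvG_zero_eq_runsB]
  simp

lemma foldl_outer (rps : Int) (ls : List (List Int)) :
    ∀ (L M D : List (List Int)),
      ls.foldl (pvAFly rps) (L, M, D) =
        (L ++ ls.map (fun s => (pvAInner rps s).1),
         M ++ ls.map (fun s => (pvAInner rps s).2.1),
         D ++ ls.map (fun s => (pvAInner rps s).2.2.1)) := by
  induction ls with
  | nil => intro L M D; simp
  | cons s ls ih =>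
      intro L M D
      rw [List.foldl_cons]
      show (ls.foldl (pvAFly rps) (L ++ [(pvAInner rps s).1], M ++ [(pvAInner rps s).2.1],
        D ++ [(pvAInner rps s).2.2.1])) = _
      rw [ih]
      simp

-- ===== VERDICT (by name: the statement is the Claim_ definition above) =====
theorem sleepDepth_spec : Claim_equal_sleepDepth := by
  intro sleep rps _
  unfold Spec_sleepDepth
  show sleepDepth sleep rps = sleepDepth_alt sleep rps
  unfold sleepDepth sleepDepth_alt
  rw [PySem.List.foldl_pyRange_zero_pyGetD' sleep [] (pvAFly rps) ([], [], [])]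
  rw [foldl_outer]
  simp [pvAInner_eq, List.map_map, Function.comp]
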